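-- pv_equiv track=rewrite | github.com/conyappa/backend | conyappa/accounts/serializers.py | expected_check_digit
-- ===== SOURCE A (Python) =====
-- def expected_check_digit(rut):
--     remaining_digits = rut
--
--     m = 0
--     s = 1
--
--     while remaining_digits > 0:
--         last_digit = remaining_digits % 10
--         remaining_digits //= 10
--
--         coef = 9 - (m % 6)
--         m += 1
--
--         s += last_digit * coef
--         s %= 11
--
--     return (s - 1) if (s > 0) else 10
-- ===== SOURCE B (Python) =====
-- def expected_check_digit(rut):
--     # staged: extract the digit list, build the full weight list up front,
--     # then take a plain dot product and map 11 - s % 11 (11 -> 0).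
--     digits = []
--     n = rut
--     while n > 0:
--         digits.append(n % 10)
--         n //= 10
--     weights = ([2, 3, 4, 5, 6, 7] * (len(digits) // 6 + 1))[:len(digits)]
--     s = sum(d * w for d, w in zip(digits, weights))
--     dv = 11 - s % 11
--     return 0 if dv == 11 else dv
-- ===== Notes on version B (the rewrite author's own statement) =====
-- stated objective: idiomatic
-- what changed: B is staged instead of fused: it first materialises the digit list, then builds the whole standard weight list [2..7] by replication and slicing, and finally takes one dot product, deriving the digit as 11 - s % 11 (11 mapped to 0); A is a single fused loop that keeps a running accumulator reduced mod 11 at every step with 9..4 coefficients seeded at 1 and the s-1/10 post-processing.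
import Mathlib
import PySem

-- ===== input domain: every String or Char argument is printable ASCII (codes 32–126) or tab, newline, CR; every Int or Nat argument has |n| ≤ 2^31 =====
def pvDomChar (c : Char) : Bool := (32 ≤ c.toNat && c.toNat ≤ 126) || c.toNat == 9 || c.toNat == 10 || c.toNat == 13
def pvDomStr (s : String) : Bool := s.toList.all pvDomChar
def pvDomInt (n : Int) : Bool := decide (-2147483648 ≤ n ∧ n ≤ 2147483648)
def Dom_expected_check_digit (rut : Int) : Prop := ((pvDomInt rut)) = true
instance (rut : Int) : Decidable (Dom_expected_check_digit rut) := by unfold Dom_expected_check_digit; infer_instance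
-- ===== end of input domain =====

-- B stages the computation (digit list, then a replicated-and-sliced weight list [2..7],
-- then one dot product with dv = 11 - s % 11, 11 mapped to 0) instead of A's fused loop
-- with a running mod-11 accumulator and 9..4 coefficients (objective: idiomatic).

-- ===== PORT A =====
-- while remaining_digits > 0: …  (literal transliteration of A's loop state s, m)
def ecdLoopA (remaining s m : Int) : Int :=
  if remaining > 0 then
    let last := PySem.Int.mod remaining 10
    let rest := PySem.Int.floordiv remaining 10
    let coef := 9 - PySem.Int.mod m 6
    ecdLoopA rest (PySem.Int.mod (s + last * coef) 11) (m + 1)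
  else s
termination_by remaining.toNat
decreasing_by
  simp only [PySem.Int.floordiv_eq_ediv_of_pos (by omega : (0:Int) < 10)]
  omega

def expected_check_digit (rut : Int) : Int :=
  let s := ecdLoopA rut 1 0
  if s > 0 then s - 1 else 10

-- ===== PORT B =====
-- while n > 0: digits.append(n % 10); n //= 10   (B's first stage, literal)
def ecdDigitsB (n : Int) (digits : List Int) : List Int :=
  if n > 0 then
    ecdDigitsB (PySem.Int.floordiv n 10) (digits ++ [PySem.Int.mod n 10])
  else digits
termination_by n.toNat
decreasing_by
  simp only [PySem.Int.floordiv_eq_ediv_of_pos (by omega : (0:Int) < 10)]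
  omega

-- weights = ([2,3,4,5,6,7] * (len(digits)//6 + 1))[:len(digits)]
-- s = sum(d * w for d, w in zip(digits, weights)); dv = 11 - s % 11
def expected_check_digit_alt (rut : Int) : Int :=
  let digits := ecdDigitsB rut []
  let weights :=
    (List.flatten (List.replicate (digits.length / 6 + 1) [2, 3, 4, 5, 6, 7])).take
      digits.length
  let s := List.foldl (· + ·) 0 (List.zipWith (· * ·) digits weights)
  let dv := 11 - PySem.Int.mod s 11
  if dv = 11 then 0 else dv

-- ===== PRECONDITION & SPEC =====
def Spec_expected_check_digit (rut : Int) (out : Int) : Prop := out = expected_check_digit_alt rut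
instance (rut : Int) (out : Int) : Decidable (Spec_expected_check_digit rut out) := by unfold Spec_expected_check_digit; infer_instance

-- ===== CLAIM (what is proved, stated in full; the proofs are below) =====
def Claim_equal_expected_check_digit : Prop := ∀ (rut : Int), Dom_expected_check_digit rut → Spec_expected_check_digit rut (expected_check_digit rut)

-- ===== LEMMAS AND PROOFS =====

-- proof-side view of the digit list (low digit first)
def ecdDigits (n : Int) : List Int :=
  if n > 0 then PySem.Int.mod n 10 :: ecdDigits (PySem.Int.floordiv n 10) else []
termination_by n.toNat
decreasing_by
  simp only [PySem.Int.floordiv_eq_ediv_of_pos (by omega : (0:Int) < 10)]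
  omega

-- proof-side view of the cyclic weights starting at offset m
def ecdCycW (m : Int) (len : Nat) : List Int :=
  match len with
  | 0 => []
  | k + 1 => (m % 6 + 2) :: ecdCycW (m + 1) k

def ecdDot (xs ws : List Int) : Int := List.foldl (· + ·) 0 (List.zipWith (· * ·) xs ws)

lemma ecdLoopA_pos (n s m : Int) (h : n > 0) :
    ecdLoopA n s m = ecdLoopA (PySem.Int.floordiv n 10)
      (PySem.Int.mod (s + PySem.Int.mod n 10 * (9 - PySem.Int.mod m 6)) 11) (m + 1) := by
  rw [ecdLoopA, if_pos h]

lemma ecdLoopA_nonpos (n s m : Int) (h : ¬ n > 0) : ecdLoopA n s m = s := by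
  rw [ecdLoopA, if_neg h]

lemma ecdDigits_pos (n : Int) (h : n > 0) :
    ecdDigits n = PySem.Int.mod n 10 :: ecdDigits (PySem.Int.floordiv n 10) := by
  rw [ecdDigits, if_pos h]

lemma ecdDigits_nonpos (n : Int) (h : ¬ n > 0) : ecdDigits n = [] := by
  rw [ecdDigits, if_neg h]

-- B's accumulation loop appends to the right of its accumulator
lemma ecdDigitsB_eq (N : Nat) : ∀ n : Int, n.toNat ≤ N → ∀ acc : List Int,
    ecdDigitsB n acc = acc ++ ecdDigits n := by
  induction N with
  | zero =>
    intro n hn acc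
    have h : ¬ n > 0 := by omega
    rw [ecdDigitsB, if_neg h, ecdDigits_nonpos n h, List.append_nil]
  | succ N ih =>
    intro n hn acc
    by_cases h : n > 0
    · have h10 : PySem.Int.floordiv n 10 = n / 10 :=
        PySem.Int.floordiv_eq_ediv_of_pos (by omega)
      rw [ecdDigitsB, if_pos h, ih _ (by omega), ecdDigits_pos n h, List.append_assoc]
      rfl
    · rw [ecdDigitsB, if_neg h, ecdDigits_nonpos n h, List.append_nil]

lemma ecdFoldl_shift (l : List Int) : ∀ a : Int,
    List.foldl (· + ·) a l = a + List.foldl (· + ·) 0 l := by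
  induction l with
  | nil => intro a; simp
  | cons x xs ih =>
    intro a
    simp only [List.foldl_cons]
    rw [ih (a + x), ih (0 + x)]
    ring

lemma ecdDot_cons (d w : Int) (ds ws : List Int) :
    ecdDot (d :: ds) (w :: ws) = d * w + ecdDot ds ws := by
  unfold ecdDot
  simp only [List.zipWith_cons_cons, List.foldl_cons, zero_add]
  rw [ecdFoldl_shift]

-- the weights pattern is 6-periodic in its offset
lemma ecdCycW_period (len : Nat) : ∀ m : Int, ecdCycW (m + 6) len = ecdCycW m len := by
  induction len with
  | zero => intro m; rfl
  | succ k ih =>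
    intro m
    unfold ecdCycW
    rw [show m + 6 + 1 = m + 1 + 6 by ring, ih (m + 1)]
    congr 1
    omega

-- B's replicated-and-sliced weight list is the cyclic pattern from offset 0
lemma ecdCycW_six (r : Nat) :
    ecdCycW 0 (r + 6) = ([2, 3, 4, 5, 6, 7] : List Int) ++ ecdCycW 0 r := by
  show (0 % 6 + 2) :: (1 % 6 + 2) :: (2 % 6 + 2) :: (3 % 6 + 2) :: (4 % 6 + 2) ::
      ((5 : Int) % 6 + 2) :: ecdCycW 6 r = _
  have hp := ecdCycW_period r 0
  rw [show (0 : Int) + 6 = 6 by norm_num] at hp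
  rw [hp]
  norm_num

lemma ecdTake_flatten (k : Nat) : ∀ len : Nat, len ≤ 6 * k →
    (List.flatten (List.replicate k ([2, 3, 4, 5, 6, 7] : List Int))).take len =
      ecdCycW 0 len := by
  induction k with
  | zero => intro len h; interval_cases len; rfl
  | succ k ih =>
    intro len h
    rw [List.replicate_succ, List.flatten_cons]
    by_cases h6 : len ≤ 5
    · interval_cases len <;> rfl
    · obtain ⟨r, rfl⟩ : ∃ r, len = r + 6 := ⟨len - 6, by omega⟩
      have hstep : (([2, 3, 4, 5, 6, 7] : List Int) ++
          (List.replicate k ([2, 3, 4, 5, 6, 7] : List Int)).flatten).take (r + 6) =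
          [2, 3, 4, 5, 6, 7] ++
            ((List.replicate k ([2, 3, 4, 5, 6, 7] : List Int)).flatten).take r := by
        rw [List.take_append]
        norm_num [List.take_of_length_le]
      rw [hstep, ih r (by omega), ecdCycW_six]

-- characterisation of A's fused loop: it computes (s - dot) % 11
lemma ecdLoopA_char (N : Nat) : ∀ n s m : Int, n.toNat ≤ N → 0 ≤ s → s < 11 → 0 ≤ m →
    ecdLoopA n s m = (s - ecdDot (ecdDigits n) (ecdCycW m (ecdDigits n).length)) % 11 := by
  induction N with
  | zero =>
    intro n s m hn h0 h1 hm
    have h : ¬ n > 0 := by omega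
    rw [ecdLoopA_nonpos n s m h, ecdDigits_nonpos n h]
    show s = (s - 0) % 11
    omega
  | succ N ih =>
    intro n s m hn h0 h1 hm
    by_cases h : n > 0
    · have h10 : PySem.Int.floordiv n 10 = n / 10 :=
        PySem.Int.floordiv_eq_ediv_of_pos (by omega)
      have hm6 : PySem.Int.mod m 6 = m % 6 := PySem.Int.mod_eq_emod_of_pos (by omega)
      have hd : PySem.Int.mod n 10 = n % 10 := PySem.Int.mod_eq_emod_of_pos (by omega)
      have hs11 : PySem.Int.mod (s + PySem.Int.mod n 10 * (9 - PySem.Int.mod m 6)) 11 =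
          (s + PySem.Int.mod n 10 * (9 - PySem.Int.mod m 6)) % 11 :=
        PySem.Int.mod_eq_emod_of_pos (by omega)
      rw [ecdLoopA_pos n s m h,
        ih _ _ _ (by omega) (by rw [hs11]; omega) (by rw [hs11]; omega) (by omega),
        ecdDigits_pos n h]
      simp only [List.length_cons]
      rw [show ecdCycW m ((ecdDigits (PySem.Int.floordiv n 10)).length + 1) =
            (m % 6 + 2) :: ecdCycW (m + 1) (ecdDigits (PySem.Int.floordiv n 10)).length
          from rfl,
        ecdDot_cons, hs11, hm6, hd]
      have e1 : n % 10 * (9 - m % 6) = 9 * (n % 10) - (n % 10) * (m % 6) := by ring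
      have e2 : n % 10 * (m % 6 + 2) = (n % 10) * (m % 6) + 2 * (n % 10) := by ring
      rw [e1, e2]
      generalize (n % 10) * (m % 6) = x
      generalize ecdDot (ecdDigits (PySem.Int.floordiv n 10))
        (ecdCycW (m + 1) (ecdDigits (PySem.Int.floordiv n 10)).length) = R
      omega
    · rw [ecdLoopA_nonpos n s m h, ecdDigits_nonpos n h]
      show s = (s - 0) % 11
      omega

-- ===== VERDICT (by name: the statement is the Claim_ definition above) =====
theorem expected_check_digit_spec : Claim_equal_expected_check_digit := by
  intro rut _
  unfold Spec_expected_check_digit expected_check_digit expected_check_digit_alt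
  simp only [ecdDigitsB_eq rut.toNat rut le_rfl, List.nil_append,
    ecdTake_flatten ((ecdDigits rut).length / 6 + 1) (ecdDigits rut).length (by omega),
    ecdLoopA_char rut.toNat rut 1 0 le_rfl (by omega) (by omega) (by omega),
    PySem.Int.mod_eq_emod_of_pos (by omega : (0:Int) < 11)]
  rw [show List.foldl (· + ·) 0
        (List.zipWith (· * ·) (ecdDigits rut) (ecdCycW 0 (ecdDigits rut).length)) =
      ecdDot (ecdDigits rut) (ecdCycW 0 (ecdDigits rut).length) from rfl]
  generalize ecdDot (ecdDigits rut) (ecdCycW 0 (ecdDigits rut).length) = D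
  split_ifs <;> omega
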